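-- pv_equiv track=rewrite | github.com/DasVinch/adventofcode | 2022/day1.py | parse
-- ===== SOURCE A (Python) =====
-- from typing import List
--
-- def parse(lines: List[str]) -> List[List[int]]:
--     elves_cals = []
--     tmp = []
--     for line in lines:
--         if line == '':
--             elves_cals += [tmp]
--             tmp = []
--         else:
--             tmp += [int(line)]
--
--     return elves_cals
-- ===== SOURCE B (Python) =====
-- from typing import List
--
-- def parse(lines: List[str]) -> List[List[int]]:
--     # Pass 1: convert every non-blank line up front (same int() calls as A).
--     vals = [None if line == '' else int(line) for line in lines]
--     # Pass 2: repeatedly cut at the first blank marker; the tail after the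
--     # last marker is never emitted, matching A's dropped trailing group.
--     out = []
--     rest = vals
--     while None in rest:
--         i = rest.index(None)
--         out.append(rest[:i])
--         rest = rest[i + 1:]
--     return out
-- ===== Notes on version B (the rewrite author's own statement) =====
-- stated objective: alternative
-- what changed: Replaces A's single accumulate-and-flush fold with two passes: map every line to its value first, then repeatedly locate the first blank marker and slice the group off, so no running tmp/group state is carried.
import Mathlib
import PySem

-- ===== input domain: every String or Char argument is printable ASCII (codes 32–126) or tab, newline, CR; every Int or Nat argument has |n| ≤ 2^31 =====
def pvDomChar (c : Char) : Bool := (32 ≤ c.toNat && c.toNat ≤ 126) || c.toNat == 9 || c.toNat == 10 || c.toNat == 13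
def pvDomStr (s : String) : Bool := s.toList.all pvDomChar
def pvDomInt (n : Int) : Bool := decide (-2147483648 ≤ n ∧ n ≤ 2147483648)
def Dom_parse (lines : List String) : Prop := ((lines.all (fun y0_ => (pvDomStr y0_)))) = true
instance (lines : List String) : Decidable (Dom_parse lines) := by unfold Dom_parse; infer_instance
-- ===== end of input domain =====

-- B replaces A's accumulate-and-flush fold by two passes (value map, then cut at each
-- blank marker by index+slice); same values, objective: alternative decomposition.


-- ===== PORT A =====
-- int(line) raises ValueError on unparsable lines; Pre_parse excludes those, so the
-- getD 0 default is never reached on admitted inputs.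
def parse (lines : List String) : List (List Int) :=
  (lines.foldl
    (fun (st : List (List Int) × List Int) line =>
      if line == "" then (st.1 ++ [st.2], [])
      else (st.1, st.2 ++ [(PySem.Int.ofStr? line).getD 0]))
    ([], [])).1

-- ===== PORT B =====
-- 'while None in rest: i = rest.index(None); out.append(rest[:i]); rest = rest[i+1:]'
-- as recursion on rest; rest[:i] (0 ≤ i) is take i, rest[i+1:] is drop (i+1), exact here.
-- The slice rest[:i] holds only ints in Python (no None before the first None), so
-- reduceOption extracts exactly those values.
def parseAltGo (rest : List (Option Int)) (out : List (List Int)) : List (List Int) :=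
  match h : PySem.List.index? rest none with
  | some i => parseAltGo (rest.drop (i + 1)) (out ++ [(rest.take i).reduceOption])
  | none => out
termination_by rest.length
decreasing_by
  obtain ⟨hk, -, -⟩ := PySem.List.getElem_of_index?_eq_some h
  simp [List.length_drop]; omega

-- vals = [None if line == '' else int(line) for line in lines]
def parse_alt (lines : List String) : List (List Int) :=
  parseAltGo
    (lines.map (fun line =>
      if line == "" then none else some ((PySem.Int.ofStr? line).getD 0))) []

-- ===== PRECONDITION & SPEC =====
-- Pre_: every non-blank line is a valid Python int literal (optional surrounding
-- whitespace, optional sign, then digits with single underscores between digits);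
-- on any other line both Pythons raise ValueError from int(line).
def pvSpaceChar (c : Char) : Bool := c = ' ' || c = '\t' || c = '\n' || c = '\r'
def pvDigitsTail : List Char → Bool
  | [] => true
  | '_' :: c :: rest => c.isDigit && pvDigitsTail rest
  | c :: rest => c.isDigit && pvDigitsTail rest
def pvIsIntLine (cs : List Char) : Bool :=
  let t := (cs.dropWhile pvSpaceChar).reverse.dropWhile pvSpaceChar |>.reverse
  let u := match t with
    | c :: rest => if c = '+' || c = '-' then rest else t
    | [] => []
  match u with
  | [] => false
  | c :: rest => c.isDigit && pvDigitsTail rest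
def Pre_parse (lines : List String) : Prop :=
  ∀ l ∈ lines, l ≠ "" → pvIsIntLine l.toList = true
instance (lines : List String) : Decidable (Pre_parse lines) := by unfold Pre_parse; infer_instance
def pvWitness_parse : List String := ["12", "7", "", "-3", "", "40"]

def Spec_parse (lines : List String) (out : List (List Int)) : Prop := out = parse_alt lines
instance (lines : List String) (out : List (List Int)) : Decidable (Spec_parse lines out) := by unfold Spec_parse; infer_instance

-- ===== CLAIM (what is proved, stated in full; the proofs are below) =====
def Claim_equal_parse : Prop := ∀ (lines : List String), Dom_parse lines → Pre_parse lines → Spec_parse lines (parse lines)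

-- ===== LEMMAS AND PROOFS =====

-- The common grouping both programs compute, by structural recursion.
def pvSpec : List String → List (List Int)
  | [] => []
  | l :: ls =>
    if l == "" then [] :: pvSpec ls
    else
      match pvSpec ls with
      | [] => []
      | g :: gs => ((PySem.Int.ofStr? l).getD 0 :: g) :: gs

-- pvSpec with a pending partial group tmp prefixed to the first emitted group.
def pvF (tmp : List Int) (ls : List String) : List (List Int) :=
  match pvSpec ls with
  | [] => []
  | g :: gs => (tmp ++ g) :: gs

-- the line-to-value map shared by the B-side lemmas
def pvVal (line : String) : Option Int :=
  if line == "" then none else some ((PySem.Int.ofStr? line).getD 0)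

theorem reduceOption_map_some (pref : List Int) : (pref.map some).reduceOption = pref := by
  induction pref with
  | nil => rfl
  | cons x xs ih => simp [List.reduceOption_cons_of_some, ih]

theorem parse_loop_eq (ls : List String) :
    ∀ (acc : List (List Int)) (tmp : List Int),
    (ls.foldl
      (fun (st : List (List Int) × List Int) line =>
        if line == "" then (st.1 ++ [st.2], [])
        else (st.1, st.2 ++ [(PySem.Int.ofStr? line).getD 0]))
      (acc, tmp)).1 = acc ++ pvF tmp ls := by
  induction ls with
  | nil => intro acc tmp; simp [pvF, pvSpec]
  | cons l ls ih =>
    intro acc tmp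
    by_cases hl : l = ""
    · subst hl
      simp only [List.foldl_cons, ih]
      cases hs : pvSpec ls with
      | nil => simp [pvF, pvSpec, hs]
      | cons g gs => simp [pvF, pvSpec, hs]
    · have hb : (l == "") = false := by simp [hl]
      simp only [List.foldl_cons, hb, Bool.false_eq_true, if_false, ih]
      cases hs : pvSpec ls with
      | nil => simp [pvF, pvSpec, hs, hl]
      | cons g gs => simp [pvF, pvSpec, hs, hl]

theorem parseAltGo_none {rest : List (Option Int)} {out : List (List Int)}
    (h : PySem.List.index? rest none = none) : parseAltGo rest out = out := by
  rw [PySem.List.index?_eq_idxOf?] at h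
  unfold parseAltGo
  split
  · rename_i i heq; rw [PySem.List.index?_eq_idxOf?, h] at heq; cases heq
  · rfl

theorem parseAltGo_some {rest : List (Option Int)} {out : List (List Int)} {i : Nat}
    (h : PySem.List.index? rest none = some i) :
    parseAltGo rest out = parseAltGo (rest.drop (i + 1)) (out ++ [(rest.take i).reduceOption]) := by
  conv_lhs => rw [parseAltGo.eq_def]
  rw [PySem.List.index?_eq_idxOf?] at h
  split
  · rename_i j heq; rw [PySem.List.index?_eq_idxOf?, h] at heq; cases heq; rfl
  · rename_i heq; rw [PySem.List.index?_eq_idxOf?, h] at heq; cases heq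

theorem parseAltGo_eq (ls : List String) :
    ∀ (pref : List Int) (out : List (List Int)),
    parseAltGo (pref.map some ++ ls.map pvVal) out = out ++ pvF pref ls := by
  induction ls with
  | nil =>
    intro pref out
    have h : PySem.List.index? (pref.map some ++ ([] : List String).map pvVal)
        (none : Option Int) = none := by
      rw [PySem.List.index?_eq_none_iff]; simp
    rw [parseAltGo_none h]; simp [pvF, pvSpec]
  | cons l ls ih =>
    intro pref out
    by_cases hl : l = ""
    · subst hl
      have hmap : ("" :: ls).map pvVal = none :: ls.map pvVal := by simp [pvVal]
      have h : PySem.List.index? (pref.map some ++ ("" :: ls).map pvVal)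
          (none : Option Int) = some pref.length := by
        rw [hmap, PySem.List.index?_eq_some_iff]
        exact ⟨pref.map some, ls.map pvVal, rfl, by simp, by simp⟩
      rw [parseAltGo_some h, hmap]
      have htake : (pref.map some ++ none :: ls.map pvVal).take pref.length
          = pref.map some := by
        rw [show pref.length = (pref.map some).length by simp, List.take_left]
      have hdrop : (pref.map some ++ none :: ls.map pvVal).drop (pref.length + 1)
          = ls.map pvVal := by
        rw [show pref.map some ++ none :: ls.map pvVal
              = (pref.map some ++ [none]) ++ ls.map pvVal by simp,
            show pref.length + 1 = (pref.map some ++ [none]).length by simp,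
            List.drop_left]
      rw [htake, hdrop]
      have hih := ih [] (out ++ [pref])
      simp only [List.map_nil, List.nil_append] at hih
      rw [reduceOption_map_some pref, hih]
      cases hs : pvSpec ls with
      | nil => simp [pvF, pvSpec, hs]
      | cons g gs => simp [pvF, pvSpec, hs]
    · have hb : (l == "") = false := by simp [hl]
      have hmap : (l :: ls).map pvVal
          = some ((PySem.Int.ofStr? l).getD 0) :: ls.map pvVal := by
        simp only [List.map_cons, pvVal, hb, Bool.false_eq_true, if_false]
      rw [hmap,
        show pref.map some ++ some ((PySem.Int.ofStr? l).getD 0) :: ls.map pvVal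
          = (pref ++ [(PySem.Int.ofStr? l).getD 0]).map some ++ ls.map pvVal by simp,
        ih (pref ++ [(PySem.Int.ofStr? l).getD 0]) out]
      cases hs : pvSpec ls with
      | nil => simp [pvF, pvSpec, hs, hl]
      | cons g gs => simp [pvF, pvSpec, hs, hl]

-- ===== VERDICT (by name: the statement is the Claim_ definition above) =====
theorem parse_spec : Claim_equal_parse := by
  intro lines _ _
  unfold Spec_parse parse parse_alt
  rw [parse_loop_eq lines [] []]
  have h := parseAltGo_eq lines [] []
  simp only [List.map_nil, List.nil_append] at h
  rw [List.nil_append]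
  exact h.symm
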